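-- pv_equiv track=rewrite | github.com/braujian565/envctl | envctl/categorizer.py | format_category_report
-- ===== SOURCE A (Python) =====
-- from typing import Dict, List, Tuple
--
-- CATEGORY_PATTERNS: Dict[str, List[str]] = {
--     "database": ["DB_", "DATABASE_", "POSTGRES", "MYSQL", "MONGO", "REDIS", "SQL"],
--     "auth": ["AUTH_", "JWT_", "SECRET", "TOKEN", "API_KEY", "PASSWORD", "PASS_"],
--     "infra": ["HOST", "PORT", "URL", "ENDPOINT", "ADDR", "SOCKET"],
--     "cloud": ["AWS_", "GCP_", "AZURE_", "S3_", "GCS_", "BUCKET"],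
--     "logging": ["LOG_", "LOGGING_", "DEBUG", "VERBOSE", "TRACE_"],
--     "feature": ["FEATURE_", "FLAG_", "FF_", "ENABLE_", "DISABLE_"],
-- }
--
-- def categorize_key(key: str) -> str:
--     """Return the category name for a given env key, or 'other'."""
--     upper = key.upper()
--     for category, patterns in CATEGORY_PATTERNS.items():
--         for pattern in patterns:
--             if upper.startswith(pattern) or pattern in upper:
--                 return category
--     return "other"
--
-- def categorize_env_set(env: Dict[str, str]) -> Dict[str, Dict[str, str]]:
--     """Group all key/value pairs in an env set by category."""
--     result: Dict[str, Dict[str, str]] = {}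
--     for key, value in env.items():
--         cat = categorize_key(key)
--         result.setdefault(cat, {})[key] = value
--     return result
--
-- def format_category_report(env: Dict[str, str]) -> str:
--     """Render a human-readable category breakdown for an env set."""
--     grouped = categorize_env_set(env)
--     if not grouped:
--         return "No variables found."
--     lines = []
--     for cat in sorted(grouped):
--         keys = sorted(grouped[cat])
--         lines.append(f"[{cat}] ({len(keys)} keys)")
--         for k in keys:
--             lines.append(f"  {k}")
--     return "\n".join(lines)
-- ===== SOURCE B (Python) =====
-- from typing import Dict, List
--
-- CATEGORY_PATTERNS: Dict[str, List[str]] = {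
--     "database": ["DB_", "DATABASE_", "POSTGRES", "MYSQL", "MONGO", "REDIS", "SQL"],
--     "auth": ["AUTH_", "JWT_", "SECRET", "TOKEN", "API_KEY", "PASSWORD", "PASS_"],
--     "infra": ["HOST", "PORT", "URL", "ENDPOINT", "ADDR", "SOCKET"],
--     "cloud": ["AWS_", "GCP_", "AZURE_", "S3_", "GCS_", "BUCKET"],
--     "logging": ["LOG_", "LOGGING_", "DEBUG", "VERBOSE", "TRACE_"],
--     "feature": ["FEATURE_", "FLAG_", "FF_", "ENABLE_", "DISABLE_"],
-- }
--
-- def format_category_report(env: Dict[str, str]) -> str: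
--     """Inverted traversal: one scan of the keys per category, priority kept by a seen set."""
--     keys = list(env)
--     grouped: Dict[str, List[str]] = {}
--     seen = set()
--     for cat, pats in CATEGORY_PATTERNS.items():
--         hit = [k for k in keys if k not in seen and any(p in k.upper() for p in pats)]
--         if hit:
--             grouped[cat] = hit
--             seen.update(hit)
--     rest = [k for k in keys if k not in seen]
--     if rest:
--         grouped["other"] = rest
--     if not grouped:
--         return "No variables found."
--     lines = []
--     for cat in sorted(grouped):
--         ks = sorted(grouped[cat])
--         lines.append(f"[{cat}] ({len(ks)} keys)")
--         lines.extend(f"  {k}" for k in ks)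
--     return "\n".join(lines)
-- ===== Notes on version B (the rewrite author's own statement) =====
-- stated objective: alternative
-- what changed: Inverted the traversal: instead of A's per-key scan through all category patterns (categorize each key, then group), B loops over the categories once, collecting for each category the not-yet-seen keys matching any of its patterns via a seen set, with leftovers becoming 'other'; formatting is unchanged.
import Mathlib
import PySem

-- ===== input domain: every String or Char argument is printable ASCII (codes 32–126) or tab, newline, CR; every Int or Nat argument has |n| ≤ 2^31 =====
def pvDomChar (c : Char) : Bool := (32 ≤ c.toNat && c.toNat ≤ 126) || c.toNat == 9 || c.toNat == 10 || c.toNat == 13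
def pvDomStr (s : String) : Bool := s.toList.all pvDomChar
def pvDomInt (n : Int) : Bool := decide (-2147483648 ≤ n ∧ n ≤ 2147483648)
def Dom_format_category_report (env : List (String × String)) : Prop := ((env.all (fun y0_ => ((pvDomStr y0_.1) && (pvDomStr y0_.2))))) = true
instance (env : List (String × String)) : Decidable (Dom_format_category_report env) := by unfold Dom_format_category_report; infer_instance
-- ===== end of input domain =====

-- B inverts the traversal: one scan of the env keys per category with a seen set, instead of A's
-- per-key search through all category patterns; same report (objective: alternative decomposition).

-- ===== PORT A =====
def CATEGORY_PATTERNS : List (String × List String) :=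
  [("database", ["DB_", "DATABASE_", "POSTGRES", "MYSQL", "MONGO", "REDIS", "SQL"]),
   ("auth", ["AUTH_", "JWT_", "SECRET", "TOKEN", "API_KEY", "PASSWORD", "PASS_"]),
   ("infra", ["HOST", "PORT", "URL", "ENDPOINT", "ADDR", "SOCKET"]),
   ("cloud", ["AWS_", "GCP_", "AZURE_", "S3_", "GCS_", "BUCKET"]),
   ("logging", ["LOG_", "LOGGING_", "DEBUG", "VERBOSE", "TRACE_"]),
   ("feature", ["FEATURE_", "FLAG_", "FF_", "ENABLE_", "DISABLE_"])]

def aMatches (upper : String) (patterns : List String) : Bool :=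
  patterns.any (fun pattern => PySem.Str.startswith upper pattern || PySem.Str.isIn pattern upper)

def categorize_key_loop (upper : String) : List (String × List String) → String
  | [] => "other"
  | (category, patterns) :: rest =>
      if aMatches upper patterns then category else categorize_key_loop upper rest

def categorize_key (key : String) : String :=
  categorize_key_loop (PySem.Str.upper key) CATEGORY_PATTERNS

def categorize_env_set (env : List (String × String)) : PySem.Dict String (PySem.Dict String String) :=
  env.foldl (fun result kv =>
    result.modify (categorize_key kv.1) PySem.Dict.empty (fun d => d.insert kv.1 kv.2))
    PySem.Dict.empty

def fmtHeader (cat : String) (n : Nat) : String :=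
  PySem.Str.join "" ["[", cat, "] (", PySem.Int.toStr (Int.ofNat n), " keys)"]

def format_category_report (env : List (String × String)) : String :=
  let grouped := categorize_env_set env
  if grouped.size = 0 then "No variables found."
  else
    let lines := (PySem.List.sorted grouped.keys (fun c => c) false).foldl (fun lines cat =>
      let keys := PySem.List.sorted (grouped.getD cat PySem.Dict.empty).keys (fun k => k) false
      (lines ++ [fmtHeader cat keys.length]) ++ keys.map (fun k => PySem.Str.join "" ["  ", k])) []
    PySem.Str.join "\n" lines

-- ===== PORT B =====
def bMatches (pats : List String) (k : String) : Bool :=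
  pats.any (fun p => PySem.Str.isIn p (PySem.Str.upper k))

def format_category_report_alt (env : List (String × String)) : String :=
  let keys := env.map Prod.fst
  let st := CATEGORY_PATTERNS.foldl
    (fun (st : PySem.Dict String (List String) × PySem.Set String) cp =>
      let hit := keys.filter (fun k => !(PySem.Set.contains st.2 k) && bMatches cp.2 k)
      if hit.isEmpty then st else (st.1.insert cp.1 hit, PySem.Set.update st.2 hit))
    (PySem.Dict.empty, PySem.Set.empty)
  let rest := keys.filter (fun k => !(PySem.Set.contains st.2 k))
  let grouped := if rest.isEmpty then st.1 else st.1.insert "other" rest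
  if grouped.size = 0 then "No variables found."
  else
    let lines := (PySem.List.sorted grouped.keys (fun c => c) false).foldl (fun lines cat =>
      let ks := PySem.List.sorted (grouped.getD cat []) (fun k => k) false
      (lines ++ [fmtHeader cat ks.length]) ++ ks.map (fun k => PySem.Str.join "" ["  ", k])) []
    PySem.Str.join "\n" lines

-- ===== PRECONDITION & SPEC =====
-- The Python parameter is a dict, which cannot hold duplicate keys: Pre_ admits exactly the
-- association lists that represent a dict value (distinct keys); no input A accepts is excluded.
def Pre_format_category_report (env : List (String × String)) : Prop :=
  (env.map Prod.fst).Nodup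
instance (env : List (String × String)) : Decidable (Pre_format_category_report env) := by
  unfold Pre_format_category_report; infer_instance

def pvWitness_format_category_report : (List (String × String)) :=
  [("DB_HOST", "x"), ("HOME", "/root"), ("JWT_KEY", "s")]

def Spec_format_category_report (env : List (String × String)) (out : String) : Prop := out = format_category_report_alt env
instance (env : List (String × String)) (out : String) : Decidable (Spec_format_category_report env out) := by unfold Spec_format_category_report; infer_instance

-- ===== CLAIM (what is proved, stated in full; the proofs are below) =====
def Claim_equal_format_category_report : Prop := ∀ (env : List (String × String)), Dom_format_category_report env → Pre_format_category_report env → Spec_format_category_report env (format_category_report env)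

-- ===== LEMMAS AND PROOFS =====

def matchedBy (cs : List (String × List String)) (k : String) : Bool :=
  cs.any (fun cp => bMatches cp.2 k)

theorem startswith_or_isIn (p u : String) :
    (PySem.Str.startswith u p || PySem.Str.isIn p u) = PySem.Str.isIn p u := by
  cases h : PySem.Str.startswith u p
  · rw [Bool.false_or]
  · have hin : PySem.Str.isIn p u = true := by
      rw [PySem.Str.isIn_iff_infix]
      exact ((PySem.Chars.startswith_iff u.toList p.toList).mp (by simpa using h)).isInfix
    rw [Bool.true_or]
    exact hin.symm

theorem aMatches_eq (k : String) (pats : List String) :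
    aMatches (PySem.Str.upper k) pats = bMatches pats k := by
  unfold aMatches bMatches
  simp only [startswith_or_isIn]

theorem catLoop_find? (k : String) (cs : List (String × List String)) :
    categorize_key_loop (PySem.Str.upper k) cs
      = (((cs.find? (fun cp => bMatches cp.2 k)).map Prod.fst).getD "other") := by
  induction cs with
  | nil => rfl
  | cons cp rest ih =>
      obtain ⟨c, pats⟩ := cp
      by_cases h : bMatches pats k
      · simp [categorize_key_loop, aMatches_eq, List.find?, h]
      · simp [categorize_key_loop, aMatches_eq, List.find?, h, ih]

theorem matchedBy_true_of_find? {pre : List (String × List String)} {k : String}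
    {cp' : String × List String} (hpre : pre.find? (fun cp => bMatches cp.2 k) = some cp') :
    matchedBy pre k = true := by
  have hp : bMatches cp'.2 k = true := List.find?_some (p := fun cp : String × List String => bMatches cp.2 k) hpre
  exact List.any_eq_true.mpr ⟨cp', List.mem_of_find?_eq_some hpre, hp⟩

theorem matchedBy_false_of_find? {pre : List (String × List String)} {k : String}
    (hpre : pre.find? (fun cp => bMatches cp.2 k) = none) :
    matchedBy pre k = false := by
  apply List.any_eq_false.mpr
  intro x hx
  simpa using List.find?_eq_none.mp hpre x hx

theorem catKey_eq_head (pre cs : List (String × List String)) (cp : String × List String)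
    (k : String) (h : CATEGORY_PATTERNS = pre ++ cp :: cs) :
    (categorize_key k == cp.1) = (!(matchedBy pre k) && bMatches cp.2 k) := by
  have hnd : (CATEGORY_PATTERNS.map Prod.fst).Nodup := by decide
  have hoth : "other" ∉ CATEGORY_PATTERNS.map Prod.fst := by decide
  rw [h] at hnd hoth
  rw [List.map_append, List.map_cons] at hnd hoth
  obtain ⟨h1, h2, hdisj⟩ := List.nodup_append.mp hnd
  unfold categorize_key
  rw [catLoop_find?, h, List.find?_append]
  cases hpre : pre.find? (fun cp => bMatches cp.2 k) with
  | some cp' =>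
      have hm := matchedBy_true_of_find? hpre
      have hne : cp'.1 ≠ cp.1 := by
        intro hcc
        have h1m : cp'.1 ∈ List.map Prod.fst pre := List.mem_map_of_mem (f := Prod.fst) (List.mem_of_find?_eq_some hpre)
        rw [hcc] at h1m
        exact hdisj _ h1m _ List.mem_cons_self rfl
      simp [hm, Option.or, hne]
  | none =>
      have hm := matchedBy_false_of_find? hpre
      simp only [hm, Bool.not_false, Bool.true_and, Option.or]
      by_cases hb : bMatches cp.2 k
      · simp [List.find?, hb]
      · simp only [List.find?_cons, hb]
        cases hrest : cs.find? (fun cp => bMatches cp.2 k) with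
        | some cp'' =>
            have hne : cp''.1 ≠ cp.1 := by
              intro hcc
              exact (List.nodup_cons.mp h2).1
                (hcc ▸ List.mem_map_of_mem (f := Prod.fst) (List.mem_of_find?_eq_some hrest))
            simp [hne]
        | none =>
            have hne : ("other" : String) ≠ cp.1 := by
              intro hcc
              exact hoth (List.mem_append_right _ (hcc ▸ List.mem_cons_self))
            simp [hne]

theorem catKey_other (k : String) :
    (categorize_key k == "other") = !(matchedBy CATEGORY_PATTERNS k) := by
  have hoth : "other" ∉ CATEGORY_PATTERNS.map Prod.fst := by decide
  unfold categorize_key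
  rw [catLoop_find?]
  cases hf : CATEGORY_PATTERNS.find? (fun cp => bMatches cp.2 k) with
  | some cp' =>
      have hm := matchedBy_true_of_find? hf
      have hne : cp'.1 ≠ "other" :=
        fun hc => hoth (hc ▸ List.mem_map_of_mem (f := Prod.fst) (List.mem_of_find?_eq_some hf))
      simp [hm, hne]
  | none =>
      have hm := matchedBy_false_of_find? hf
      simp [hm]

theorem A_keys_aux (l : List (String × String))
    (d : PySem.Dict String (PySem.Dict String String))
    (hnd : (l.map Prod.fst).Nodup)
    (H : ∀ kv ∈ l, ∀ c', (d.getD c' PySem.Dict.empty).contains kv.1 = false) (c : String) :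
    ((l.foldl (fun result kv =>
        result.modify (categorize_key kv.1) PySem.Dict.empty (fun dd => dd.insert kv.1 kv.2)) d).getD
          c PySem.Dict.empty).keys
      = (d.getD c PySem.Dict.empty).keys
          ++ (l.filter (fun kv => categorize_key kv.1 == c)).map Prod.fst := by
  induction l generalizing d with
  | nil => simp
  | cons kv t ih =>
      rw [List.map_cons, List.nodup_cons] at hnd
      rw [List.foldl_cons]
      set d' := d.modify (categorize_key kv.1) PySem.Dict.empty (fun dd => dd.insert kv.1 kv.2) with hd'
      have H' : ∀ kv' ∈ t, ∀ c', (d'.getD c' PySem.Dict.empty).contains kv'.1 = false := by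
        intro kv' hkv' c'
        rw [hd', PySem.Dict.getD_modify]
        split_ifs with hc
        · rw [PySem.Dict.contains_insert]
          have hne : kv'.1 ≠ kv.1 := by
            intro he
            exact hnd.1 (he ▸ List.mem_map_of_mem (f := Prod.fst) hkv')
          have := H kv' (List.mem_cons_of_mem _ hkv') (categorize_key kv.1)
          simp [hne, this]
        · exact H kv' (List.mem_cons_of_mem _ hkv') c'
      rw [ih d' hnd.2 H']
      rw [List.filter_cons]
      by_cases hc : categorize_key kv.1 = c
      · have hgd : d'.getD c PySem.Dict.empty
            = (d.getD c PySem.Dict.empty).insert kv.1 kv.2 := by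
          rw [hd', PySem.Dict.getD_modify]
          simp [hc]
        rw [hgd, PySem.Dict.keys_insert_of_not_contains _ _ (H kv List.mem_cons_self c)]
        simp [hc]
      · have hgd : d'.getD c PySem.Dict.empty = d.getD c PySem.Dict.empty := by
          rw [hd', PySem.Dict.getD_modify]
          simp [Ne.symm hc]
        rw [hgd]
        simp [hc]

theorem A_cats (env : List (String × String)) :
    (categorize_env_set env).keys
      = PySem.Set.ofList ((env.map Prod.fst).map categorize_key) := by
  unfold categorize_env_set
  rw [PySem.Dict.keys_foldl_modify_key]
  rw [PySem.Dict.keys_empty, PySem.Set.update_nil_left]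
  congr 1
  rw [List.map_map]
  rfl

def bHit (keys : List String) (P : String → Bool) (pats : List String) : List String :=
  keys.filter (fun k => !P k && bMatches pats k)

def bGroups (keys : List String) (P : String → Bool) :
    List (String × List String) → List (String × List String)
  | [] => []
  | cp :: cs =>
      if (bHit keys P cp.2).isEmpty then bGroups keys P cs
      else (cp.1, bHit keys P cp.2) :: bGroups keys (fun k => P k || bMatches cp.2 k) cs

theorem B_fold (keys : List String) (cs : List (String × List String))
    (g : PySem.Dict String (List String)) (s : PySem.Set String) (P : String → Bool)
    (hnd : (cs.map Prod.fst).Nodup)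
    (hs : ∀ k ∈ keys, PySem.Set.contains s k = P k)
    (hfresh : ∀ c ∈ cs.map Prod.fst, c ∉ g.keys) :
    (cs.foldl (fun (st : PySem.Dict String (List String) × PySem.Set String) cp =>
        let hit := keys.filter (fun k => !(PySem.Set.contains st.2 k) && bMatches cp.2 k)
        if hit.isEmpty then st else (st.1.insert cp.1 hit, PySem.Set.update st.2 hit)) (g, s)).1.items
        = g.items ++ bGroups keys P cs
    ∧ (∀ k ∈ keys,
        PySem.Set.contains (cs.foldl (fun (st : PySem.Dict String (List String) × PySem.Set String) cp =>
          let hit := keys.filter (fun k => !(PySem.Set.contains st.2 k) && bMatches cp.2 k)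
          if hit.isEmpty then st else (st.1.insert cp.1 hit, PySem.Set.update st.2 hit)) (g, s)).2 k
          = (P k || matchedBy cs k)) := by
  induction cs generalizing g s P with
  | nil =>
      constructor
      · simp [bGroups]
      · intro k hk
        simpa [matchedBy] using hs k hk
  | cons cp cs' ih =>
      rw [List.map_cons, List.nodup_cons] at hnd
      have hhit : keys.filter (fun k => !(PySem.Set.contains s k) && bMatches cp.2 k)
          = bHit keys P cp.2 := by
        apply List.filter_congr
        intro k hk
        rw [hs k hk]
      rw [List.foldl_cons]
      simp only [hhit]
      by_cases he : (bHit keys P cp.2).isEmpty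
      · simp only [he, if_pos]
        have hnomatch : ∀ k ∈ keys, (!P k && bMatches cp.2 k) = false := by
          intro k hk
          by_contra hne
          have : k ∈ bHit keys P cp.2 := List.mem_filter.mpr ⟨hk, by
            cases hb : (!P k && bMatches cp.2 k) <;> simp_all⟩
          rw [List.isEmpty_iff] at he
          simp [he] at this
        obtain ⟨ih1, ih2⟩ := ih g s P hnd.2 hs (fun c hc => hfresh c (List.mem_cons_of_mem _ hc))
        constructor
        · rw [ih1, bGroups, if_pos he]
        · intro k hk
          rw [ih2 k hk]
          have := hnomatch k hk
          cases hP : P k <;> cases hb : bMatches cp.2 k <;> simp_all [matchedBy]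
      · simp only [he, if_neg, Bool.not_eq_true]
        have hcont : g.contains cp.1 = false := by
          have : ¬ (g.contains cp.1 = true) := by
            rw [PySem.Dict.contains_iff_mem_keys]
            exact hfresh cp.1 List.mem_cons_self
          cases hb : g.contains cp.1
          · rfl
          · exact absurd hb this
        have hs' : ∀ k ∈ keys,
            PySem.Set.contains (PySem.Set.update s (bHit keys P cp.2)) k
              = (P k || bMatches cp.2 k) := by
          intro k hk
          rw [Bool.eq_iff_iff, PySem.Set.contains_iff, PySem.Set.mem_update, ← hs k hk]
          constructor
          · rintro (hin | hin)
            · simp only [Bool.or_eq_true, PySem.Set.contains_iff]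
              exact Or.inl hin
            · have h2 := (List.mem_filter.mp hin).2
              rw [Bool.and_eq_true] at h2
              simp [h2.2]
          · intro hor
            cases hc : PySem.Set.contains s k with
            | true => exact Or.inl ((PySem.Set.contains_iff s k).mp hc)
            | false =>
                rw [hc, Bool.false_or] at hor
                right
                apply List.mem_filter.mpr
                refine ⟨hk, ?_⟩
                have hPf : P k = false := by rw [← hs k hk]; exact hc
                simp [hPf, hor]
        have hfresh' : ∀ c ∈ cs'.map Prod.fst, c ∉ (g.insert cp.1 (bHit keys P cp.2)).keys := by
          intro c hc
          rw [PySem.Dict.mem_keys_insert]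
          rintro (hce | hcg)
          · exact hnd.1 (hce ▸ hc)
          · exact hfresh c (List.mem_cons_of_mem _ hc) hcg
        obtain ⟨ih1, ih2⟩ := ih (g.insert cp.1 (bHit keys P cp.2))
          (PySem.Set.update s (bHit keys P cp.2)) (fun k => P k || bMatches cp.2 k)
          hnd.2 hs' hfresh'
        constructor
        · rw [ih1, PySem.Dict.items_insert_of_not_contains _ _ hcont, bGroups, if_neg he]
          simp
        · intro k hk
          rw [ih2 k hk]
          simp [matchedBy, Bool.or_assoc]

def keyFilter (keys : List String) (c : String) : List String :=
  keys.filter (fun k => categorize_key k == c)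

theorem bHit_eq (keys : List String) (pre cs : List (String × List String))
    (cp : String × List String) (h : CATEGORY_PATTERNS = pre ++ cp :: cs) :
    bHit keys (matchedBy pre) cp.2 = keyFilter keys cp.1 := by
  unfold bHit keyFilter
  apply List.filter_congr
  intro k _
  exact (catKey_eq_head pre cs cp k h).symm

theorem bGroups_congr (keys : List String) (P Q : String → Bool)
    (h : ∀ k ∈ keys, P k = Q k) :
    ∀ cs, bGroups keys P cs = bGroups keys Q cs := by
  intro cs
  induction cs generalizing P Q with
  | nil => rfl
  | cons cp cs' ih =>
      have hhit : bHit keys P cp.2 = bHit keys Q cp.2 := by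
        apply List.filter_congr
        intro k hk
        rw [h k hk]
      rw [bGroups, bGroups, hhit]
      by_cases he : (bHit keys Q cp.2).isEmpty
      · rw [if_pos he, if_pos he]
        exact ih P Q h
      · rw [if_neg he, if_neg he]
        congr 1
        exact ih _ _ (fun k hk => by rw [h k hk])

theorem bGroups_eq_filterMap (keys : List String) (cs pre : List (String × List String))
    (h : CATEGORY_PATTERNS = pre ++ cs) :
    bGroups keys (matchedBy pre) cs
      = cs.filterMap (fun cp =>
          if (keyFilter keys cp.1).isEmpty then none else some (cp.1, keyFilter keys cp.1)) := by
  induction cs generalizing pre with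
  | nil => rfl
  | cons cp cs' ih =>
      rw [bGroups, bHit_eq keys pre cs' cp h, List.filterMap_cons]
      have hP : (fun k => matchedBy pre k || bMatches cp.2 k) = matchedBy (pre ++ [cp]) := by
        funext k
        simp [matchedBy, List.any_append]
      have h' : CATEGORY_PATTERNS = (pre ++ [cp]) ++ cs' := by simp [h]
      by_cases he : (keyFilter keys cp.1).isEmpty
      · rw [if_pos he, if_pos he]
        have hemp : ∀ k ∈ keys, (!(matchedBy pre k) && bMatches cp.2 k) = false := by
          intro k hk
          have : keyFilter keys cp.1 = [] := List.isEmpty_iff.mp he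
          rw [← bHit_eq keys pre cs' cp h] at this
          by_contra hne
          have hmem : k ∈ bHit keys (matchedBy pre) cp.2 :=
            List.mem_filter.mpr ⟨hk, by cases hb : (!(matchedBy pre k) && bMatches cp.2 k) <;> simp_all⟩
          rw [this] at hmem
          exact absurd hmem (List.not_mem_nil)
        rw [bGroups_congr keys (matchedBy pre) (matchedBy (pre ++ [cp]))
          (by
            intro k hk
            have hek := hemp k hk
            show matchedBy pre k = matchedBy (pre ++ [cp]) k
            unfold matchedBy at hek ⊢
            rw [List.any_append]
            cases hP : pre.any (fun cp => bMatches cp.2 k)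
            · rw [Bool.false_or]
              rw [hP] at hek
              simp only [Bool.not_false, Bool.true_and] at hek
              simp [hek]
            · rw [Bool.true_or]) cs']
        exact ih (pre ++ [cp]) h'
      · rw [if_neg he, if_neg he, hP]
        rw [ih (pre ++ [cp]) h']

def allCats : List String := CATEGORY_PATTERNS.map Prod.fst ++ ["other"]

def catG (keys : List String) (c : String) : Option (String × List String) :=
  if (keyFilter keys c).isEmpty then none else some (c, keyFilter keys c)

def presentCats (keys : List String) : List String :=
  allCats.filter (fun c => !(keyFilter keys c).isEmpty)

def gFull (keys : List String) : List (String × List String) :=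
  allCats.filterMap (catG keys)

def renderReport (keys : List String) : String :=
  PySem.Str.join "\n" ((PySem.List.sorted (presentCats keys) (fun c => c) false).foldl
    (fun lines cat =>
      (lines ++ [fmtHeader cat (PySem.List.sorted (keyFilter keys cat) (fun k => k) false).length])
        ++ (PySem.List.sorted (keyFilter keys cat) (fun k => k) false).map
            (fun k => PySem.Str.join "" ["  ", k])) [])

theorem filterMap_catG_map_fst (keys : List String) (l : List String) :
    (l.filterMap (catG keys)).map Prod.fst = l.filter (fun c => !(keyFilter keys c).isEmpty) := by
  induction l with
  | nil => rfl
  | cons c cs ih =>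
      rw [List.filterMap_cons, List.filter_cons]
      by_cases he : (keyFilter keys c).isEmpty
      · rw [show catG keys c = none from by unfold catG; rw [if_pos he], he]
        simpa using ih
      · have hb : (keyFilter keys c).isEmpty = false := by
          cases hb : (keyFilter keys c).isEmpty
          · rfl
          · exact absurd hb he
        rw [show catG keys c = some (c, keyFilter keys c) from by unfold catG; rw [if_neg he],
          List.map_cons, ih, hb, Bool.not_false, if_pos rfl]

theorem gFull_map_fst (keys : List String) :
    (gFull keys).map Prod.fst = presentCats keys :=
  filterMap_catG_map_fst keys allCats

theorem catKey_mem_allCats (k : String) : categorize_key k ∈ allCats := by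
  unfold categorize_key allCats
  rw [catLoop_find?]
  cases hf : CATEGORY_PATTERNS.find? (fun cp => bMatches cp.2 k) with
  | some cp' =>
      simp only [Option.map_some, Option.getD_some]
      exact List.mem_append_left _ (List.mem_map_of_mem (f := Prod.fst) (List.mem_of_find?_eq_some hf))
  | none => simp

theorem nodup_allCats : allCats.Nodup := by decide

theorem mem_gFull_of_mem_presentCats (keys : List String) {c : String}
    (hc : c ∈ presentCats keys) : (c, keyFilter keys c) ∈ gFull keys := by
  obtain ⟨hmem, hne⟩ := List.mem_filter.mp hc
  apply List.mem_filterMap.mpr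
  refine ⟨c, hmem, ?_⟩
  unfold catG
  rw [if_neg (by cases hb : (keyFilter keys c).isEmpty <;> simp_all)]

theorem nodup_presentCats (keys : List String) : (presentCats keys).Nodup :=
  List.Nodup.filter _ nodup_allCats

theorem mem_presentCats_iff (keys : List String) (c : String) :
    c ∈ presentCats keys ↔ ∃ k ∈ keys, categorize_key k = c := by
  constructor
  · intro hc
    obtain ⟨_, hne⟩ := List.mem_filter.mp hc
    have : keyFilter keys c ≠ [] := by
      intro hnil
      rw [hnil] at hne
      simp at hne
    obtain ⟨k, hk⟩ := List.exists_mem_of_ne_nil _ this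
    obtain ⟨hk1, hk2⟩ := List.mem_filter.mp hk
    exact ⟨k, hk1, by simpa using hk2⟩
  · rintro ⟨k, hk, rfl⟩
    apply List.mem_filter.mpr
    refine ⟨catKey_mem_allCats k, ?_⟩
    have : k ∈ keyFilter keys (categorize_key k) := List.mem_filter.mpr ⟨hk, by simp⟩
    cases hb : (keyFilter keys (categorize_key k)).isEmpty
    · rfl
    · rw [List.isEmpty_iff] at hb
      rw [hb] at this
      exact absurd this (List.not_mem_nil)

-- lines foldl over equal cat lists with equal per-cat key lists

theorem render_congr (S : List String) (f g : String → List String)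
    (h : ∀ c ∈ S, f c = g c) :
    S.foldl (fun lines cat =>
      (lines ++ [fmtHeader cat (f cat).length]) ++ (f cat).map (fun k => PySem.Str.join "" ["  ", k])) []
      = S.foldl (fun lines cat =>
      (lines ++ [fmtHeader cat (g cat).length]) ++ (g cat).map (fun k => PySem.Str.join "" ["  ", k])) [] := by
  apply PySem.List.foldl_congr_mem
  intro acc x hx
  rw [h x hx]

theorem B_assemble (keys : List String) (st : PySem.Dict String (List String) × PySem.Set String)
    (h1 : st.1.items = CATEGORY_PATTERNS.filterMap (fun cp => catG keys cp.1))
    (h2 : ∀ k ∈ keys, PySem.Set.contains st.2 k = matchedBy CATEGORY_PATTERNS k)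
    (hne : keys ≠ []) :
    (let rest := keys.filter (fun k => !(PySem.Set.contains st.2 k))
     let grouped := if rest.isEmpty then st.1 else st.1.insert "other" rest
     if grouped.size = 0 then "No variables found."
     else
       let lines := (PySem.List.sorted grouped.keys (fun c => c) false).foldl (fun lines cat =>
         let ks := PySem.List.sorted (grouped.getD cat []) (fun k => k) false
         (lines ++ [fmtHeader cat ks.length]) ++ ks.map (fun k => PySem.Str.join "" ["  ", k])) []
       PySem.Str.join "\n" lines) = renderReport keys := by
  have hrest : keys.filter (fun k => !(PySem.Set.contains st.2 k)) = keyFilter keys "other" := by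
    apply List.filter_congr
    intro k hk
    rw [h2 k hk]
    exact (catKey_other k).symm
  have hgA : st.1 = PySem.Dict.mk (CATEGORY_PATTERNS.filterMap (fun cp => catG keys cp.1)) :=
    PySem.Dict.ext h1
  have hsplit : gFull keys
      = CATEGORY_PATTERNS.filterMap (fun cp => catG keys cp.1)
        ++ (if (keyFilter keys "other").isEmpty then [] else [("other", keyFilter keys "other")]) := by
    unfold gFull allCats
    rw [List.filterMap_append, List.filterMap_map]
    congr 1
    rw [List.filterMap_cons]
    unfold catG
    by_cases he : (keyFilter keys "other").isEmpty
    · rw [if_pos he, if_pos he, List.filterMap_nil]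
    · rw [if_neg he, if_neg he, List.filterMap_nil]
  have hcontother : (PySem.Dict.mk (CATEGORY_PATTERNS.filterMap (fun cp => catG keys cp.1))).contains "other" = false := by
    cases hb : (PySem.Dict.mk (CATEGORY_PATTERNS.filterMap (fun cp => catG keys cp.1))).contains "other"
    · rfl
    · exfalso
      have hmem := (PySem.Dict.contains_iff_mem_keys _ _).mp hb
      have hk : (PySem.Dict.mk (CATEGORY_PATTERNS.filterMap (fun cp => catG keys cp.1))).keys
          = (CATEGORY_PATTERNS.map Prod.fst).filter (fun c => !(keyFilter keys c).isEmpty) := by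
        show (CATEGORY_PATTERNS.filterMap (fun cp => catG keys cp.1)).map Prod.fst = _
        have hcomp : (fun cp : String × List String => catG keys cp.1) = (catG keys ∘ Prod.fst) := rfl
        rw [hcomp, ← List.filterMap_map, filterMap_catG_map_fst]
      rw [hk] at hmem
      have := List.mem_of_mem_filter hmem
      have hoth : "other" ∉ CATEGORY_PATTERNS.map Prod.fst := by decide
      exact hoth this
  have hgrouped : (if (keyFilter keys "other").isEmpty then st.1
      else st.1.insert "other" (keyFilter keys "other")) = PySem.Dict.mk (gFull keys) := by
    by_cases he : (keyFilter keys "other").isEmpty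
    · rw [if_pos he, hgA]
      apply PySem.Dict.ext
      show _ = gFull keys
      rw [hsplit, if_pos he, List.append_nil]
    · rw [if_neg he, hgA]
      apply PySem.Dict.ext
      rw [PySem.Dict.items_insert_of_not_contains _ _ hcontother]
      show _ = gFull keys
      rw [hsplit, if_neg he]
  simp only [hrest, hgrouped]
  have hkeysg : (PySem.Dict.mk (gFull keys)).keys = presentCats keys := gFull_map_fst keys
  have hne0 : (PySem.Dict.mk (gFull keys)).size ≠ 0 := by
    intro h0
    have hlen : (gFull keys).length = 0 := h0
    rw [List.length_eq_zero_iff] at hlen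
    obtain ⟨k0, hk0⟩ := List.exists_mem_of_ne_nil _ hne
    have : categorize_key k0 ∈ presentCats keys :=
      (mem_presentCats_iff keys _).mpr ⟨k0, hk0, rfl⟩
    rw [← hkeysg] at this
    show False
    have : categorize_key k0 ∈ (gFull keys).map Prod.fst := this
    rw [hlen] at this
    exact absurd this (List.not_mem_nil)
  rw [if_neg hne0, hkeysg]
  unfold renderReport
  congr 1
  apply render_congr (PySem.List.sorted (presentCats keys) (fun c => c) false)
    (fun c => PySem.List.sorted ((PySem.Dict.mk (gFull keys)).getD c []) (fun k => k) false)
    (fun c => PySem.List.sorted (keyFilter keys c) (fun k => k) false)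
  intro c hc
  have hcp : c ∈ presentCats keys := (PySem.List.mem_sorted _ _ _ _).mp hc
  have hnd : (PySem.Dict.mk (gFull keys)).keys.Nodup := by
    rw [hkeysg]; exact nodup_presentCats keys
  rw [PySem.Dict.getD_of_mem_items (PySem.Dict.mk (gFull keys))
    (show (c, keyFilter keys c) ∈ (PySem.Dict.mk (gFull keys)).items from
      mem_gFull_of_mem_presentCats keys hcp) hnd]

theorem B_report (env : List (String × String)) (hne : env ≠ []) :
    format_category_report_alt env = renderReport (env.map Prod.fst) := by
  obtain ⟨hitems, hcont⟩ := B_fold (env.map Prod.fst) CATEGORY_PATTERNS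
    PySem.Dict.empty PySem.Set.empty (fun _ => false) (by decide) (fun k _ => rfl)
    (by simp [PySem.Dict.keys_empty])
  have hbg : bGroups (env.map Prod.fst) (fun _ => false) CATEGORY_PATTERNS
      = CATEGORY_PATTERNS.filterMap (fun cp => catG (env.map Prod.fst) cp.1) := by
    rw [bGroups_congr (env.map Prod.fst) (fun _ => false) (matchedBy []) (fun k _ => rfl) CATEGORY_PATTERNS,
      bGroups_eq_filterMap (env.map Prod.fst) CATEGORY_PATTERNS [] rfl]
    rfl
  have h1 : (CATEGORY_PATTERNS.foldl
      (fun (st : PySem.Dict String (List String) × PySem.Set String) cp =>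
        let hit := (env.map Prod.fst).filter (fun k => !(PySem.Set.contains st.2 k) && bMatches cp.2 k)
        if hit.isEmpty then st else (st.1.insert cp.1 hit, PySem.Set.update st.2 hit))
      (PySem.Dict.empty, PySem.Set.empty)).1.items
      = CATEGORY_PATTERNS.filterMap (fun cp => catG (env.map Prod.fst) cp.1) := by
    rw [hitems, hbg]
    rfl
  have h2 : ∀ k ∈ env.map Prod.fst, PySem.Set.contains (CATEGORY_PATTERNS.foldl
      (fun (st : PySem.Dict String (List String) × PySem.Set String) cp =>
        let hit := (env.map Prod.fst).filter (fun k => !(PySem.Set.contains st.2 k) && bMatches cp.2 k)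
        if hit.isEmpty then st else (st.1.insert cp.1 hit, PySem.Set.update st.2 hit))
      (PySem.Dict.empty, PySem.Set.empty)).2 k = matchedBy CATEGORY_PATTERNS k := by
    intro k hk
    rw [hcont k hk, Bool.false_or]
  have hkne : env.map Prod.fst ≠ [] := by
    intro h
    exact hne (List.map_eq_nil_iff.mp h)
  exact B_assemble (env.map Prod.fst) _ h1 h2 hkne

theorem A_report (env : List (String × String)) (hnd : (env.map Prod.fst).Nodup)
    (hne : env ≠ []) :
    format_category_report env = renderReport (env.map Prod.fst) := by
  have hAK : ∀ c, ((categorize_env_set env).getD c PySem.Dict.empty).keys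
      = keyFilter (env.map Prod.fst) c := by
    intro c
    unfold categorize_env_set
    rw [A_keys_aux env PySem.Dict.empty hnd
      (by intro kv _ c'; rw [PySem.Dict.getD_empty]; exact PySem.Dict.contains_empty _) c]
    rw [PySem.Dict.getD_empty, PySem.Dict.keys_empty, List.nil_append]
    unfold keyFilter
    rw [List.filter_map]
    rfl
  have hkeysA : (categorize_env_set env).keys
      = PySem.Set.ofList ((env.map Prod.fst).map categorize_key) := A_cats env
  have hperm : (categorize_env_set env).keys.Perm (presentCats (env.map Prod.fst)) := by
    rw [hkeysA]
    apply (List.perm_ext_iff_of_nodup (PySem.Set.nodup_ofList _) (nodup_presentCats _)).mpr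
    intro a
    rw [PySem.Set.mem_ofList, mem_presentCats_iff, List.mem_map]
  have hsorted : PySem.List.sorted (categorize_env_set env).keys (fun c => c) false
      = PySem.List.sorted (presentCats (env.map Prod.fst)) (fun c => c) false :=
    PySem.List.sorted_eq_sorted_of_perm _ _ _ (fun _ _ h => h) hperm
  have hne0 : (categorize_env_set env).size ≠ 0 := by
    intro h0
    have hitems : (categorize_env_set env).items = [] := List.length_eq_zero_iff.mp h0
    have hkeys0 : (categorize_env_set env).keys = [] := by
      show (categorize_env_set env).items.map Prod.fst = []
      rw [hitems]
      rfl
    obtain ⟨kv, hkv⟩ := List.exists_mem_of_ne_nil _ hne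
    have : categorize_key kv.1 ∈ (categorize_env_set env).keys := by
      rw [hkeysA]
      exact (PySem.Set.mem_ofList _ _).mpr
        (List.mem_map_of_mem (List.mem_map_of_mem (f := Prod.fst) hkv))
    rw [hkeys0] at this
    exact absurd this (List.not_mem_nil)
  unfold format_category_report
  rw [if_neg hne0, hsorted]
  unfold renderReport
  exact congrArg (PySem.Str.join "\n") (render_congr (PySem.List.sorted (presentCats (env.map Prod.fst)) (fun c => c) false)
    (fun c => PySem.List.sorted ((categorize_env_set env).getD c PySem.Dict.empty).keys (fun k => k) false)
    (fun c => PySem.List.sorted (keyFilter (env.map Prod.fst) c) (fun k => k) false)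
    (fun c _ => by simp only [hAK c]))

theorem main_equiv (env : List (String × String)) (hnd : (env.map Prod.fst).Nodup) :
    format_category_report env = format_category_report_alt env := by
  cases henv : env with
  | nil => rfl
  | cons kv t =>
      rw [← henv]
      rw [A_report env hnd (by rw [henv]; exact List.cons_ne_nil _ _),
        B_report env (by rw [henv]; exact List.cons_ne_nil _ _)]

-- ===== VERDICT (by name: the statement is the Claim_ definition above) =====
theorem format_category_report_spec : Claim_equal_format_category_report := by
  intro env _ hnd
  exact main_equiv env hnd
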